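-- pv_equiv track=rewrite | github.com/sandk0/fancai-vibe-hackathon | backend/app/services/nlp_canary.py | percentage_to_stage
-- ===== SOURCE A (Python) =====
-- from enum import IntEnum
--
-- class RolloutStage(IntEnum):
--     """
--     Стадии постепенного rollout новой NLP архитектуры.
--
--     Каждая стадия соответствует проценту пользователей на новой архитектуре.
--     """
--     DISABLED = 0      # 0% - все пользователи на старой архитектуре
--     EARLY_TESTING = 1 # 5% - ранее тестирование
--     EXPANDED = 2      # 25% - расширенное тестирование
--     HALF_ROLLOUT = 3  # 50% - половина пользователей
--     FULL_ROLLOUT = 4  # 100% - полный rollout (production default)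
--
-- STAGE_PERCENTAGES = {
--     RolloutStage.DISABLED: 0,
--     RolloutStage.EARLY_TESTING: 5,
--     RolloutStage.EXPANDED: 25,
--     RolloutStage.HALF_ROLLOUT: 50,
--     RolloutStage.FULL_ROLLOUT: 100,
-- }
--
-- def percentage_to_stage(percentage: int) -> RolloutStage:
--     """Конвертировать процент в ближайшую стадию."""
--     for stage, pct in STAGE_PERCENTAGES.items():
--         if pct == percentage:
--             return stage
--
--     # Если точного совпадения нет, находим ближайшую меньшую стадию
--     for stage in reversed(list(RolloutStage)):
--         if STAGE_PERCENTAGES[stage] <= percentage: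
--             return stage
--
--     return RolloutStage.DISABLED
-- ===== SOURCE B (Python) =====
-- from enum import IntEnum
--
-- class RolloutStage(IntEnum):
--     DISABLED = 0
--     EARLY_TESTING = 1
--     EXPANDED = 2
--     HALF_ROLLOUT = 3
--     FULL_ROLLOUT = 4
--
-- _THRESHOLDS = [0, 5, 25, 50, 100]
--
-- def percentage_to_stage(percentage: int) -> RolloutStage:
--     """Binary-search the sorted threshold table; index of the highest threshold <= percentage, clamped at 0."""
--     lo, hi = 0, len(_THRESHOLDS)
--     while lo < hi:
--         mid = (lo + hi) // 2
--         if percentage < _THRESHOLDS[mid]: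
--             hi = mid
--         else:
--             lo = mid + 1
--     return RolloutStage(max(lo - 1, 0))
-- ===== Notes on version B (the rewrite author's own statement) =====
-- stated objective: idiomatic
-- what changed: Replaced A's exact-match dict loop plus reverse linear scan over the stages with a single binary search over the sorted threshold table [0,5,25,50,100], returning the clamped index of the highest threshold <= percentage.
import Mathlib
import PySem

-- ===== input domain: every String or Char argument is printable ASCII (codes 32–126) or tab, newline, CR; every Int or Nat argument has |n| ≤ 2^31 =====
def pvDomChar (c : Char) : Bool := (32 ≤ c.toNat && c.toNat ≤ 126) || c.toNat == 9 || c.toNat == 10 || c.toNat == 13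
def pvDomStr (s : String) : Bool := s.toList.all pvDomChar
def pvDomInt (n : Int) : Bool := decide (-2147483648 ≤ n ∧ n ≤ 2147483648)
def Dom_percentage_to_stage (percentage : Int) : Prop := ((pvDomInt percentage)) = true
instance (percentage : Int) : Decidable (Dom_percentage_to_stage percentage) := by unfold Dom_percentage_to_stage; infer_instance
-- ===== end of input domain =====

-- B replaces A's exact-match dict loop + reverse linear scan by one binary search over the sorted threshold table (idiomatic; no speed claim).

-- ===== PORT A =====
-- STAGE_PERCENTAGES as an association list (stage, pct) in insertion order
def pvStagePercentages : List (Int × Int) := [(0, 0), (1, 5), (2, 25), (3, 50), (4, 100)]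

-- dict lookup on the association list (first match; STAGE_PERCENTAGES[stage] always hits)
def pvLookup : List (Int × Int) → Int → Int
  | [], _ => 0
  | (k, v) :: rest, s => if k = s then v else pvLookup rest s

-- first loop: `for stage, pct in STAGE_PERCENTAGES.items(): if pct == percentage: return stage`
def pvFindExact : List (Int × Int) → Int → Option Int
  | [], _ => none
  | (stage, pct) :: rest, p => if pct = p then some stage else pvFindExact rest p

-- second loop: `for stage in reversed(list(RolloutStage)): if STAGE_PERCENTAGES[stage] <= percentage: return stage`
def pvFindLe : List Int → Int → Option Int
  | [], _ => none
  | stage :: rest, p =>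
    if pvLookup pvStagePercentages stage ≤ p then some stage else pvFindLe rest p

def percentage_to_stage (percentage : Int) : Int :=
  match pvFindExact pvStagePercentages percentage with
  | some stage => stage
  | none =>
    match pvFindLe [4, 3, 2, 1, 0] percentage with
    | some stage => stage
    | none => 0

-- ===== PORT B =====
def pvThresholds : List Int := [0, 5, 25, 50, 100]

-- Source B's `while lo < hi` binary-search loop; fuel 8 > log2(5) bounds the iterations, loop state (lo, hi) unchanged
def pvBisectLoop (p : Int) : Nat → Nat → Nat → Nat
  | lo, _, 0 => lo
  | lo, hi, fuel + 1 =>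
    if lo < hi then
      let mid := (lo + hi) / 2
      if p < pvThresholds.getD mid 0 then pvBisectLoop p lo mid fuel
      else pvBisectLoop p (mid + 1) hi fuel
    else lo

def percentage_to_stage_alt (percentage : Int) : Int :=
  max ((pvBisectLoop percentage 0 pvThresholds.length 8 : Int) - 1) 0

-- ===== PRECONDITION & SPEC =====
def Spec_percentage_to_stage (percentage : Int) (out : Int) : Prop := out = percentage_to_stage_alt percentage
instance (percentage : Int) (out : Int) : Decidable (Spec_percentage_to_stage percentage out) := by unfold Spec_percentage_to_stage; infer_instance

-- ===== CLAIM (what is proved, stated in full; the proofs are below) =====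
def Claim_equal_percentage_to_stage : Prop := ∀ (percentage : Int), Dom_percentage_to_stage percentage → Spec_percentage_to_stage percentage (percentage_to_stage percentage)

-- ===== LEMMAS AND PROOFS =====
-- closed characterisation of A's two loops
theorem pvA_char (p : Int) :
    percentage_to_stage p =
      (if 100 ≤ p then 4 else if 50 ≤ p then 3 else if 25 ≤ p then 2 else if 5 ≤ p then 1 else 0) := by
  unfold percentage_to_stage
  simp only [pvFindExact, pvFindLe, pvLookup, pvStagePercentages]
  norm_num
  split_ifs <;> first | rfl | omega

-- closed characterisation of B's binary-search loop result
theorem pvB_char (p : Int) :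
    percentage_to_stage_alt p =
      (if 100 ≤ p then 4 else if 50 ≤ p then 3 else if 25 ≤ p then 2 else if 5 ≤ p then 1 else 0) := by
  unfold percentage_to_stage_alt
  norm_num [pvBisectLoop, pvThresholds]
  split_ifs <;> omega


-- ===== VERDICT (by name: the statement is the Claim_ definition above) =====
theorem percentage_to_stage_spec : Claim_equal_percentage_to_stage := by
  intro p _
  unfold Spec_percentage_to_stage
  rw [pvA_char, pvB_char]
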